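-- pv_equiv track=rewrite | github.com/filipp218/education_algorithm | join.py | right_join
-- ===== SOURCE A (Python) =====
-- def right_join(t1, t2):
--     """
--     >>> right_join([(1, 2), (1, 3), (0, 1)], [(1, 10), (1, 20), (2, 40)])
--     [(1, 2, 10), (1, 3, 10), (1, 2, 20), (1, 3, 20), (2, None, 40)]
--     """
--     b_by_a = {}
--     for a, b in t1:
--         if a not in b_by_a:
--             b_by_a[a] = []
--         b_by_a[a].append(b)
--
--     result = []
--     for a, c in t2:
--         if a in b_by_a:
--             for b in b_by_a[a]:
--                 item = (a, b, c)
--                 result.append(item)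
--         else:
--             item = (a, None, c)
--             result.append(item)
--     return result
-- ===== SOURCE B (Python) =====
-- def right_join(t1, t2):
--     # Same output, no dict index: for each right row scan t1 in order,
--     # tracking a matched flag to emit the (a, None, c) row when nothing matched.
--     result = []
--     for a, c in t2:
--         matched = False
--         for a2, b in t1:
--             if a2 == a:
--                 result.append((a, b, c))
--                 matched = True
--         if not matched:
--             result.append((a, None, c))
--     return result
-- ===== Notes on version B (the rewrite author's own statement) =====
-- stated objective: alternative
-- what changed: Replaced A's prebuilt dict-of-lists index with a direct nested scan over t1 per t2 row, using a matched flag for the None row; no dict is built.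
import Mathlib
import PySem

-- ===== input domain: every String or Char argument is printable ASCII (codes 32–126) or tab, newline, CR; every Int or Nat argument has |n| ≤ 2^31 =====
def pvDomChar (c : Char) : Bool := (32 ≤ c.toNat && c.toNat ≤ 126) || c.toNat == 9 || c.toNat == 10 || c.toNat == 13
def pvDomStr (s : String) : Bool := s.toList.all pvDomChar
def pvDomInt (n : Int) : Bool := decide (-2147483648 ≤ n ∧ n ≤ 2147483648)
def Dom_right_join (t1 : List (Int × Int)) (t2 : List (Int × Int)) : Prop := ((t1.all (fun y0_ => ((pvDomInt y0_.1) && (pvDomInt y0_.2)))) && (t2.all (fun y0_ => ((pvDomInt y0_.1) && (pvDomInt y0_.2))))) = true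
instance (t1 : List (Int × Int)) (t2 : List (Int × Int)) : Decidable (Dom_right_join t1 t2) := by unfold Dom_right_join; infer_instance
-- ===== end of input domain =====

-- B drops A's dict-of-lists index and does a per-t2-row nested scan of t1 with a matched flag (alternative decomposition, same output).


-- ===== PORT A =====
-- one iteration of A's first loop: `if a not in b_by_a: b_by_a[a] = []` then `b_by_a[a].append(b)`
def rjStep (d : PySem.Dict Int (List Int)) (p : Int × Int) : PySem.Dict Int (List Int) :=
  let d' := if d.contains p.1 then d else d.insert p.1 []
  d'.modify p.1 [] (fun l => l ++ [p.2])

def right_join (t1 : List (Int × Int)) (t2 : List (Int × Int)) : List (Int × Option Int × Int) :=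
  let b_by_a := t1.foldl rjStep PySem.Dict.empty
  t2.foldl (fun res p =>
    if b_by_a.contains p.1 then
      (b_by_a.getD p.1 []).foldl (fun r b => r ++ [(p.1, some b, p.2)]) res
    else res ++ [(p.1, none, p.2)]) []

-- ===== PORT B =====
def right_join_alt (t1 : List (Int × Int)) (t2 : List (Int × Int)) : List (Int × Option Int × Int) :=
  t2.foldl (fun res p =>
    let s := t1.foldl
      (fun (s : List (Int × Option Int × Int) × Bool) q =>
        if q.1 == p.1 then (s.1 ++ [(p.1, some q.2, p.2)], true) else s)
      (res, false)
    if s.2 then s.1 else s.1 ++ [(p.1, none, p.2)]) []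

-- ===== PRECONDITION & SPEC =====
def Spec_right_join (t1 : List (Int × Int)) (t2 : List (Int × Int)) (out : List (Int × Option Int × Int)) : Prop := out = right_join_alt t1 t2
instance (t1 : List (Int × Int)) (t2 : List (Int × Int)) (out : List (Int × Option Int × Int)) : Decidable (Spec_right_join t1 t2 out) := by unfold Spec_right_join; infer_instance

-- ===== CLAIM (what is proved, stated in full; the proofs are below) =====
def Claim_equal_right_join : Prop := ∀ (t1 : List (Int × Int)) (t2 : List (Int × Int)), Dom_right_join t1 t2 → Spec_right_join t1 t2 (right_join t1 t2)

-- ===== LEMMAS AND PROOFS =====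

-- A's "ensure key exists, then append" step is exactly a modify-with-default.
theorem rjStep_eq_modify (d : PySem.Dict Int (List Int)) (p : Int × Int) :
    rjStep d p = d.modify p.1 [] (fun l => l ++ [p.2]) := by
  unfold rjStep
  split_ifs with h
  · rfl
  · obtain ⟨items⟩ := d
    simp only [PySem.Dict.modify, PySem.Dict.insert, PySem.Dict.contains, PySem.Dict.getD,
      PySem.Dict.get?] at *
    rw [if_neg h]
    have hf : List.find? (fun p2 => p2.1 == p.1) items = none := by
      rw [List.find?_eq_none]; intro q hq
      simp only [List.any_eq_true, not_exists, not_and] at h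
      simpa using h q hq
    simp [List.any_append, h, List.find?_append, hf]
    conv_rhs => rw [← List.map_id items]
    apply List.map_congr_left; intro q hq
    have := List.find?_eq_none.mp hf q hq
    simp_all

theorem rjStep_funext : rjStep = fun (d : PySem.Dict Int (List Int)) p => d.modify p.1 [] (fun l => l ++ [p.2]) := by
  funext d p; exact rjStep_eq_modify d p

-- value stored under key a in A's index
theorem build_getD (t1 : List (Int × Int)) (a : Int) :
    (t1.foldl rjStep PySem.Dict.empty).getD a [] =
      (t1.filter (fun q => q.1 == a)).map (fun q => q.2) := by
  rw [rjStep_funext, PySem.Dict.getD_foldl_modify_append]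
  simp

-- key membership of A's index
theorem build_contains (t1 : List (Int × Int)) (d : PySem.Dict Int (List Int)) (a : Int) :
    (t1.foldl rjStep d).contains a = (d.contains a || t1.any (fun q => q.1 == a)) := by
  induction t1 generalizing d with
  | nil => simp
  | cons p t ih =>
    rw [List.foldl_cons, ih, rjStep_eq_modify, PySem.Dict.contains_modify]
    simp only [List.any_cons]
    by_cases h : a == p.1
    · simp [beq_iff_eq.mp h]
    · have : ¬ (p.1 == a) = true := by
        simp only [beq_iff_eq] at *; exact fun h2 => h h2.symm
      simp [h, this]

-- B's inner scan over t1, characterised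
theorem inner_scan (t1 : List (Int × Int)) (a c : Int)
    (res : List (Int × Option Int × Int)) (m : Bool) :
    t1.foldl (fun (s : List (Int × Option Int × Int) × Bool) q =>
        if q.1 == a then (s.1 ++ [(a, some q.2, c)], true) else s) (res, m)
      = (res ++ (t1.filter (fun q => q.1 == a)).map (fun q => (a, some q.2, c)),
         m || t1.any (fun q => q.1 == a)) := by
  induction t1 generalizing res m with
  | nil => simp
  | cons p t ih =>
    rw [List.foldl_cons]
    by_cases h : p.1 == a
    · rw [if_pos h, ih]
      simp [h]
    · rw [if_neg h, ih]
      simp [h]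

-- ===== VERDICT (by name: the statement is the Claim_ definition above) =====
theorem right_join_spec : Claim_equal_right_join := by
  intro t1 t2 _
  unfold Spec_right_join right_join right_join_alt
  show t2.foldl _ ([] : List (Int × Option Int × Int)) = t2.foldl _ []
  congr 1
  funext res p
  by_cases h : (t1.foldl rjStep PySem.Dict.empty).contains p.1
  · have hany : t1.any (fun q => q.1 == p.1) = true := by
      rw [build_contains] at h; simpa using h
    simp only [h, if_true, build_getD, inner_scan, hany, Bool.or_true, if_true,
      PySem.List.foldl_append_singleton_eq_map, List.map_map]
    rfl
  · have hany : t1.any (fun q => q.1 == p.1) = false := by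
      rw [build_contains] at h
      simp only [PySem.Dict.contains_empty, Bool.false_or] at h
      exact Bool.eq_false_iff.mpr h
    have hfil : t1.filter (fun q => q.1 == p.1) = [] := by
      rw [List.filter_eq_nil_iff]; intro q hq
      simp only [List.any_eq_false] at hany
      simp [hany q hq]
    simp only [h, Bool.false_eq_true, if_false, inner_scan, hany, Bool.or_false, hfil,
      List.map_nil, List.append_nil]
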